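-- pv_equiv track=rewrite | github.com/tcl326/av-trajectory-planner | simulator/simulator.py | getCurrPoints
-- ===== SOURCE A (Python) =====
-- def getCurrPoints(x, y, outline):
--     points = []
--     for idx, point in enumerate(outline):
--         if idx%2 == 0:
--             point += x
--         else:
--             point += y
--         points.append(point)
--     return points
-- ===== SOURCE B (Python) =====
-- def getCurrPoints(x, y, outline):
--     points = list(outline)
--     points[0::2] = [p + x for p in points[0::2]]
--     points[1::2] = [p + y for p in points[1::2]]
--     return points
-- ===== Notes on version B (the rewrite author's own statement) =====
-- stated objective: idiomatic
-- what changed: Replaces the per-element enumerate/parity-branch loop with two strided-slice passes: update the even positions and the odd positions each in one slice assignment on a copy of the list.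
import Mathlib
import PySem

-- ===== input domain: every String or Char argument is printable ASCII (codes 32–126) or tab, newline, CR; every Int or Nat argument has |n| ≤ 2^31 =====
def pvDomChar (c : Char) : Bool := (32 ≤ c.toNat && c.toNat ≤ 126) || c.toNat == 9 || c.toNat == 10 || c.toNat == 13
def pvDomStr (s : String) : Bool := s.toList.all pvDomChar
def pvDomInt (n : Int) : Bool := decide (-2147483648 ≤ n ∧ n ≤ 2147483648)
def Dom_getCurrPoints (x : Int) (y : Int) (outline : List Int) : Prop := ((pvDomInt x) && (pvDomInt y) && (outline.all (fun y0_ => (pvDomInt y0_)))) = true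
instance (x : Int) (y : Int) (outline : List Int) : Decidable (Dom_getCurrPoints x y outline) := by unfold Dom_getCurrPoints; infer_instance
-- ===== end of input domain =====

-- B replaces A's per-element parity branch by two strided-slice passes (idiomatic decomposition; same O(n) cost).

-- ===== PORT A =====
-- the Python for-loop over enumerate(outline), carrying the index and the accumulated points list
def getCurrPointsLoop (x : Int) (y : Int) : Nat → List Int → List Int → List Int
  | _, points, [] => points
  | idx, points, point :: rest =>
      getCurrPointsLoop x y (idx + 1)
        (points ++ [if idx % 2 == 0 then point + x else point + y]) rest

def getCurrPoints (x : Int) (y : Int) (outline : List Int) : List Int :=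
  getCurrPointsLoop x y 0 [] outline

-- ===== PORT B =====
-- Source B's strided slices: points[0::2] / points[1::2] extraction …
def stride2 : List Int → List Int
  | [] => []
  | [a] => [a]
  | a :: _ :: t => a :: stride2 t

-- … and the slice re-assignment, writing the two updated strides back into their positions
def interleave : List Int → List Int → List Int
  | [], ys => ys
  | z :: zs, ys => z :: interleave ys zs
termination_by xs ys => xs.length + ys.length
decreasing_by simp [List.length_cons]; omega

def getCurrPoints_alt (x : Int) (y : Int) (outline : List Int) : List Int :=
  interleave ((stride2 outline).map (· + x)) ((stride2 outline.tail).map (· + y))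

-- ===== PRECONDITION & SPEC =====
def Spec_getCurrPoints (x : Int) (y : Int) (outline : List Int) (out : List Int) : Prop := out = getCurrPoints_alt x y outline
instance (x : Int) (y : Int) (outline : List Int) (out : List Int) : Decidable (Spec_getCurrPoints x y outline out) := by unfold Spec_getCurrPoints; infer_instance

-- ===== CLAIM (what is proved, stated in full; the proofs are below) =====
def Claim_equal_getCurrPoints : Prop := ∀ (x : Int) (y : Int) (outline : List Int), Dom_getCurrPoints x y outline → Spec_getCurrPoints x y outline (getCurrPoints x y outline)

-- ===== LEMMAS AND PROOFS =====
theorem stride2_cons_tail (b : Int) (t : List Int) :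
    stride2 (b :: t) = b :: stride2 t.tail := by
  cases t <;> simp [stride2]

theorem loop_interleave (x y : Int) :
    ∀ (l : List Int) (idx : Nat) (points : List Int), idx % 2 = 0 →
      getCurrPointsLoop x y idx points l =
        points ++ interleave ((stride2 l).map (· + x)) ((stride2 l.tail).map (· + y))
  | [], _, points, _ => by simp [getCurrPointsLoop, stride2, interleave]
  | [a], idx, points, h => by
      simp [getCurrPointsLoop, stride2, interleave, h]
  | a :: b :: t, idx, points, h => by
      have h2 : (idx + 1 + 1) % 2 = 0 := by omega
      have ih := loop_interleave x y t (idx + 1 + 1) (points ++ [a + x] ++ [b + y]) h2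
      simp only [getCurrPointsLoop]
      rw [if_pos (by simp [h]), if_neg (by simp only [beq_iff_eq]; omega), ih]
      simp [stride2, stride2_cons_tail, interleave, List.append_assoc]

-- ===== VERDICT (by name: the statement is the Claim_ definition above) =====
theorem getCurrPoints_spec : Claim_equal_getCurrPoints := by
  intro x y outline _
  unfold Spec_getCurrPoints getCurrPoints getCurrPoints_alt
  simpa using loop_interleave x y outline 0 [] rfl
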